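-- pv_equiv track=rewrite | github.com/jeremyrclark/PolyhedraNetFolder | tools/generate_catalan_nets.py | find_shared_edge
-- ===== SOURCE A (Python) =====
-- def find_shared_edge(
--     fi: int, fj: int, faces: list[list[int]]
-- ) -> tuple[tuple[int, int], int, int] | None:
--     """Return ((va,vb), idx_on_fi, idx_on_fj) for shared edge."""
--     verts_i = faces[fi]
--     set_j = set(faces[fj])
--     ki = len(verts_i)
--     for i in range(ki):
--         a, b = verts_i[i], verts_i[(i + 1) % ki]
--         if a in set_j and b in set_j:
--             jlist = faces[fj]
--             kj = len(jlist)
--             for j in range(kj):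
--                 if jlist[j] == a and jlist[(j + 1) % kj] == b:
--                     return (a, b), i, j
--                 if jlist[j] == b and jlist[(j + 1) % kj] == a:
--                     return (a, b), i, j
--     return None
-- ===== SOURCE B (Python) =====
-- def find_shared_edge(fi, fj, faces):
--     """Return ((va,vb), idx_on_fi, idx_on_fj) for shared edge."""
--     jlist = faces[fj]
--     kj = len(jlist)
--     table = {}
--     for t in range(kj):
--         x, y = jlist[t], jlist[(t + 1) % kj]
--         table.setdefault((x, y), t)
--         table.setdefault((y, x), t)
--     verts_i = faces[fi]
--     ki = len(verts_i)
--     for i in range(ki):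
--         a, b = verts_i[i], verts_i[(i + 1) % ki]
--         t = table.get((a, b))
--         if t is not None:
--             return (a, b), i, t
--     return None
-- ===== Notes on version B (the rewrite author's own statement) =====
-- stated objective: faster
-- what changed: B first builds a dict mapping each directed edge of face fj (both orientations, keeping the first index) and then finds the first edge of face fi by a single table lookup per edge, replacing A's per-edge membership test plus inner scan over face fj.
import Mathlib
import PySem

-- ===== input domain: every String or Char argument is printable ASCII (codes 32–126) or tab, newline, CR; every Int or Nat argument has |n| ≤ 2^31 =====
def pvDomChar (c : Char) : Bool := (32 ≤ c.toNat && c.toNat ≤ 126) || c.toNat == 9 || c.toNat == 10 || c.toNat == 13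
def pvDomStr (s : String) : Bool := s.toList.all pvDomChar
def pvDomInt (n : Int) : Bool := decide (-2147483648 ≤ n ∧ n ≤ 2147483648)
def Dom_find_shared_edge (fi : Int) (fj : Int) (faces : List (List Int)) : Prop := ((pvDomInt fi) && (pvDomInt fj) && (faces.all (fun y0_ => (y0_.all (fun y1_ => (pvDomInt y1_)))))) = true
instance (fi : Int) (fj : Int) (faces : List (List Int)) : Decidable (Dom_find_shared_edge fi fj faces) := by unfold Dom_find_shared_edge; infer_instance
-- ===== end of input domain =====

-- B builds a dict from each directed edge of face fj (both orientations, keeping the first index)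
-- and then looks each edge of face fi up once, replacing A's per-edge inner scan over face fj
-- (objective: a table-based single-pass algorithm instead of nested scans).


-- ===== PORT A =====
-- inner 'for j in range(kj)' loop; indices drawn from List.range kj are in range, so
-- List.getD is exact for Python's jlist[j] / jlist[(j+1)%kj] (nonnegative, < kj).
def pvAInner (jlist : List Int) (kj : Nat) (a b : Int) : List Nat → Option Nat
  | [] => none
  | j :: rest =>
    if jlist.getD j 0 = a ∧ jlist.getD ((j + 1) % kj) 0 = b then some j
    else if jlist.getD j 0 = b ∧ jlist.getD ((j + 1) % kj) 0 = a then some j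
    else pvAInner jlist kj a b rest

-- outer 'for i in range(ki)' loop
def pvAOuter (verts_i jlist : List Int) (set_j : PySem.Set Int) (ki kj : Nat) :
    List Nat → Option ((Int × Int) × Int × Int)
  | [] => none
  | i :: rest =>
    let a := verts_i.getD i 0
    let b := verts_i.getD ((i + 1) % ki) 0
    if PySem.Set.contains set_j a && PySem.Set.contains set_j b then
      match pvAInner jlist kj a b (List.range kj) with
      | some j => some ((a, b), (i : Int), (j : Int))
      | none => pvAOuter verts_i jlist set_j ki kj rest
    else pvAOuter verts_i jlist set_j ki kj rest

def find_shared_edge (fi : Int) (fj : Int) (faces : List (List Int)) : Option ((Int × Int) × Int × Int) :=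
  match PySem.List.pyGet? faces fi, PySem.List.pyGet? faces fj with
  | some verts_i, some jlist =>
      pvAOuter verts_i jlist (PySem.Set.ofList jlist) verts_i.length jlist.length
        (List.range verts_i.length)
  | _, _ => none  -- Python raises IndexError here; excluded by Pre_

-- ===== PORT B =====
-- 'for t in range(kj): table.setdefault((x,y),t); table.setdefault((y,x),t)'
def pvBuild (jlist : List Int) (kj : Nat) (table : PySem.Dict (Int × Int) Nat) :
    List Nat → PySem.Dict (Int × Int) Nat
  | [] => table
  | t :: rest =>
    let x := jlist.getD t 0
    let y := jlist.getD ((t + 1) % kj) 0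
    pvBuild jlist kj ((table.setdefault (x, y) t).setdefault (y, x) t) rest

-- 'for i in range(ki): ... t = table.get((a,b)); if t is not None: return ...'
def pvBLookup (verts_i : List Int) (table : PySem.Dict (Int × Int) Nat) (ki : Nat) :
    List Nat → Option ((Int × Int) × Int × Int)
  | [] => none
  | i :: rest =>
    let a := verts_i.getD i 0
    let b := verts_i.getD ((i + 1) % ki) 0
    match table.get? (a, b) with
    | some t => some ((a, b), (i : Int), (t : Int))
    | none => pvBLookup verts_i table ki rest

def find_shared_edge_alt (fi : Int) (fj : Int) (faces : List (List Int)) : Option ((Int × Int) × Int × Int) :=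
  match PySem.List.pyGet? faces fj with
  | none => none  -- Python raises IndexError here; excluded by Pre_
  | some jlist =>
    let table := pvBuild jlist jlist.length PySem.Dict.empty (List.range jlist.length)
    match PySem.List.pyGet? faces fi with
    | none => none  -- Python raises IndexError here; excluded by Pre_
    | some verts_i => pvBLookup verts_i table verts_i.length (List.range verts_i.length)

-- ===== PRECONDITION & SPEC =====
-- Python A raises IndexError exactly when fi or fj is out of range for faces.
def Pre_find_shared_edge (fi : Int) (fj : Int) (faces : List (List Int)) : Prop :=
  PySem.Raise.InRange faces.length fi ∧ PySem.Raise.InRange faces.length fj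
instance (fi : Int) (fj : Int) (faces : List (List Int)) : Decidable (Pre_find_shared_edge fi fj faces) := by unfold Pre_find_shared_edge; infer_instance
def pvWitness_find_shared_edge : Int × Int × List (List Int) := (0, 1, [[0, 1, 2], [1, 0, 3]])

def Spec_find_shared_edge (fi : Int) (fj : Int) (faces : List (List Int)) (out : Option ((Int × Int) × Int × Int)) : Prop := out = find_shared_edge_alt fi fj faces
instance (fi : Int) (fj : Int) (faces : List (List Int)) (out : Option ((Int × Int) × Int × Int)) : Decidable (Spec_find_shared_edge fi fj faces out) := by unfold Spec_find_shared_edge; infer_instance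

-- ===== CLAIM (what is proved, stated in full; the proofs are below) =====
def Claim_equal_find_shared_edge : Prop := ∀ (fi : Int) (fj : Int) (faces : List (List Int)), Dom_find_shared_edge fi fj faces → Pre_find_shared_edge fi fj faces → Spec_find_shared_edge fi fj faces (find_shared_edge fi fj faces)

-- ===== LEMMAS AND PROOFS =====

theorem pvGet?_setdefault_eq (d : PySem.Dict (Int × Int) Nat) (k' : Int × Int) (w : Nat)
    (k : Int × Int) :
    (d.setdefault k' w).get? k =
      if k = k' ∧ d.get? k = none then some w else d.get? k := by
  by_cases hk : k = k'
  · subst hk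
    rw [PySem.Dict.get?_setdefault_self]
    cases h : d.get? k <;> simp
  · rw [PySem.Dict.get?_setdefault_of_ne d w hk]
    simp [hk]

theorem pvBuild_get (jlist : List Int) (kj : Nat) :
    ∀ (ts : List Nat) (d : PySem.Dict (Int × Int) Nat) (a b : Int),
      (pvBuild jlist kj d ts).get? (a, b) =
        match d.get? (a, b) with
        | some v => some v
        | none => pvAInner jlist kj a b ts := by
  intro ts
  induction ts with
  | nil => intro d a b; cases h : d.get? (a, b) <;> simp [pvBuild, pvAInner, h]
  | cons t rest ih =>
    intro d a b
    rw [pvBuild, ih, pvAInner]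
    rw [pvGet?_setdefault_eq, pvGet?_setdefault_eq]
    by_cases hxa : jlist.getD t 0 = a <;>
      by_cases hyb : jlist.getD ((t + 1) % kj) 0 = b <;>
      by_cases hxb : jlist.getD t 0 = b <;>
      by_cases hya : jlist.getD ((t + 1) % kj) 0 = a <;>
      cases hd : d.get? (a, b) <;>
      simp [hxa, hyb, hxb, hya, hd, Prod.ext_iff] <;>
      simp_all [eq_comm] <;> (try rw [← hd])

theorem pvAInner_mem (jlist : List Int) (a b : Int) :
    ∀ (ts : List Nat) (j : Nat), (∀ t ∈ ts, t < jlist.length) →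
      pvAInner jlist jlist.length a b ts = some j → a ∈ jlist ∧ b ∈ jlist := by
  intro ts
  induction ts with
  | nil => intro j _ h; simp [pvAInner] at h
  | cons t rest ih =>
    intro j hb h
    have ht : t < jlist.length := hb t (by simp)
    have hpos : 0 < jlist.length := Nat.lt_of_le_of_lt (Nat.zero_le t) ht
    have ht2 : (t + 1) % jlist.length < jlist.length := Nat.mod_lt _ hpos
    rw [pvAInner] at h
    split_ifs at h with h1 h2
    · refine ⟨?_, ?_⟩
      · rw [← h1.1, List.getD_eq_getElem _ _ ht]; exact List.getElem_mem ht
      · rw [← h1.2, List.getD_eq_getElem _ _ ht2]; exact List.getElem_mem ht2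
    · refine ⟨?_, ?_⟩
      · rw [← h2.2, List.getD_eq_getElem _ _ ht2]; exact List.getElem_mem ht2
      · rw [← h2.1, List.getD_eq_getElem _ _ ht]; exact List.getElem_mem ht
    · exact ih j (fun x hx => hb x (by simp [hx])) h

theorem pvTable_get (jlist : List Int) (a b : Int) :
    (pvBuild jlist jlist.length PySem.Dict.empty (List.range jlist.length)).get? (a, b) =
      pvAInner jlist jlist.length a b (List.range jlist.length) := by
  rw [pvBuild_get jlist jlist.length (List.range jlist.length) PySem.Dict.empty a b,
    PySem.Dict.get?_empty]

theorem pvLoops_eq (verts_i jlist : List Int) (ki : Nat) :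
    ∀ (is : List Nat),
      pvAOuter verts_i jlist (PySem.Set.ofList jlist) ki jlist.length is =
        pvBLookup verts_i
          (pvBuild jlist jlist.length PySem.Dict.empty (List.range jlist.length)) ki is := by
  intro is
  induction is with
  | nil => rfl
  | cons i rest ih =>
    have htab := pvTable_get jlist (verts_i.getD i 0) (verts_i.getD ((i + 1) % ki) 0)
    simp only [pvAOuter, pvBLookup, htab]
    cases h : pvAInner jlist jlist.length (verts_i.getD i 0) (verts_i.getD ((i + 1) % ki) 0)
        (List.range jlist.length) with
    | some j =>
      have hmem := pvAInner_mem jlist _ _ (List.range jlist.length) j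
        (fun t ht => List.mem_range.mp ht) h
      have hga : PySem.Set.contains (PySem.Set.ofList jlist) (verts_i.getD i 0) = true :=
        (PySem.Set.contains_iff _ _).mpr ((PySem.Set.mem_ofList _ _).mpr hmem.1)
      have hgb : PySem.Set.contains (PySem.Set.ofList jlist) (verts_i.getD ((i + 1) % ki) 0) = true :=
        (PySem.Set.contains_iff _ _).mpr ((PySem.Set.mem_ofList _ _).mpr hmem.2)
      simp [hga, hgb]
      intro hcon
      exact absurd hmem.2 (hcon hmem.1)
    | none =>
      split_ifs <;> exact ih

-- ===== VERDICT (by name: the statement is the Claim_ definition above) =====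
theorem find_shared_edge_spec : Claim_equal_find_shared_edge := by
  intro fi fj faces _ _
  unfold Spec_find_shared_edge find_shared_edge find_shared_edge_alt
  cases hvj : PySem.List.pyGet? faces fj with
  | none => cases PySem.List.pyGet? faces fi <;> rfl
  | some jlist =>
    cases hvi : PySem.List.pyGet? faces fi with
    | none => rfl
    | some verts_i => exact pvLoops_eq verts_i jlist verts_i.length (List.range verts_i.length)
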